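-- pv_equiv track=rewrite | github.com/GabrielCardosoLIma/busca-nao-informada-ia | main.py | gerar_grafo_kn
-- ===== SOURCE A (Python) =====
-- def gerar_grafo_kn(quantidade_vertices: int, arestas_por_vertice: int) -> dict:
--     # Gera um grafo kn onde cada vértice está conectado a exatamente k outros vértices de determinada.
--     grafo = {v: set() for v in range(quantidade_vertices)}
--
--     for vertice in range(quantidade_vertices):
--         for i in range(1, arestas_por_vertice + 1):
--             vizinho = (vertice + i) % quantidade_vertices
--             grafo[vertice].add(vizinho)
--             grafo[vizinho].add(vertice)
--
--     return grafo
-- ===== SOURCE B (Python) =====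
-- def gerar_grafo_kn(quantidade_vertices: int, arestas_por_vertice: int) -> dict:
--     # Gather formulation: each vertex independently collects its own circular
--     # neighborhood (no mutation of other vertices' sets).
--     n, k = quantidade_vertices, arestas_por_vertice
--     grafo = {}
--     for v in range(n):
--         vizinhos = set(range(max(0, v - k), v))                 # lower neighbors
--         vizinhos.update((v + i) % n for i in range(1, k + 1))   # forward neighbors
--         vizinhos.update(range(max(v + 1, n + v - k), n))        # wrap-around upper neighbors
--         grafo[v] = vizinhos
--     return grafo
-- ===== Notes on version B (the rewrite author's own statement) =====
-- stated objective: alternative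
-- what changed: Scatter became gather: A builds all sets up front and, looping over edges, mutates both endpoints' sets (grafo[vizinho].add(vertice)); B computes each vertex's complete adjacency set independently from three closed-form ranges (lower neighbors, forward (v+i)%n targets, wrap-around upper neighbors), never touching another vertex's entry.
import Mathlib
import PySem

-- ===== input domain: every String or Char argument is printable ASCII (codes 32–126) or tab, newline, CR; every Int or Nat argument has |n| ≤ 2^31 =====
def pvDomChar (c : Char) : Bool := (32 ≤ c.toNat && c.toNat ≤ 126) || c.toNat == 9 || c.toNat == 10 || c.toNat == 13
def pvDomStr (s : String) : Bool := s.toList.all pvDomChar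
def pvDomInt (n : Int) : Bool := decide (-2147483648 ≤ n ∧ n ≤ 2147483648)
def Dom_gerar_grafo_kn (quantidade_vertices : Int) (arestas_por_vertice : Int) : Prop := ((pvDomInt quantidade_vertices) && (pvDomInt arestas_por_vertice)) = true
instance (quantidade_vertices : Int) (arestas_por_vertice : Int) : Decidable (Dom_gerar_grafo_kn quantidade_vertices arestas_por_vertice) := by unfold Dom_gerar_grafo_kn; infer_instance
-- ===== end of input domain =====

-- B replaces A's scatter loop (mutating both endpoints' sets per edge) by a gather:
-- each vertex builds its own adjacency set from three closed-form ranges (same O(n*k) cost).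

-- ===== PORT A =====
def gerar_grafo_kn (quantidade_vertices : Int) (arestas_por_vertice : Int) : List (Int × List Int) :=
  let grafo0 : PySem.Dict Int (PySem.Set Int) :=
    (PySem.List.pyRange 0 quantidade_vertices 1).foldl
      (fun d v => d.insert v PySem.Set.empty) PySem.Dict.empty
  let grafo :=
    (PySem.List.pyRange 0 quantidade_vertices 1).foldl (fun d vertice =>
      (PySem.List.pyRange 1 (arestas_por_vertice + 1) 1).foldl (fun d i =>
        let vizinho := PySem.Int.mod (vertice + i) quantidade_vertices
        let d := d.modify vertice PySem.Set.empty (fun s => PySem.Set.add s vizinho)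
        d.modify vizinho PySem.Set.empty (fun s => PySem.Set.add s vertice)) d) grafo0
  grafo.items

-- ===== PORT B =====
def gerar_grafo_kn_alt (quantidade_vertices : Int) (arestas_por_vertice : Int) : List (Int × List Int) :=
  ((PySem.List.pyRange 0 quantidade_vertices 1).foldl (fun g v =>
      let viz := PySem.Set.ofList
        (PySem.List.pyRange (max 0 (v - arestas_por_vertice)) v 1)
      let viz := PySem.Set.update viz
        ((PySem.List.pyRange 1 (arestas_por_vertice + 1) 1).map
          (fun i => PySem.Int.mod (v + i) quantidade_vertices))
      let viz := PySem.Set.update viz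
        (PySem.List.pyRange (max (v + 1) (quantidade_vertices + v - arestas_por_vertice))
          quantidade_vertices 1)
      g.insert v viz) PySem.Dict.empty).items

-- ===== PRECONDITION & SPEC =====
def Spec_gerar_grafo_kn (quantidade_vertices : Int) (arestas_por_vertice : Int) (out : List (Int × List Int)) : Prop := out = gerar_grafo_kn_alt quantidade_vertices arestas_por_vertice
instance (quantidade_vertices : Int) (arestas_por_vertice : Int) (out : List (Int × List Int)) : Decidable (Spec_gerar_grafo_kn quantidade_vertices arestas_por_vertice out) := by unfold Spec_gerar_grafo_kn; infer_instance

-- ===== CLAIM (what is proved, stated in full; the proofs are below) =====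
def Claim_equal_gerar_grafo_kn : Prop := ∀ (quantidade_vertices : Int) (arestas_por_vertice : Int), Dom_gerar_grafo_kn quantidade_vertices arestas_por_vertice → Spec_gerar_grafo_kn quantidade_vertices arestas_por_vertice (gerar_grafo_kn quantidade_vertices arestas_por_vertice)

-- ===== LEMMAS AND PROOFS =====

-- Proof-side helpers: the value stored at vertex v after t outer iterations of A's loop
-- is `Set.ofList` of the explicit "attempt list" pvAtt; pvAttI refines it inside the inner loop.

def pvFwd (n v j : Int) : List Int :=
  (PySem.List.pyRange 1 (j + 1) 1).map (fun i => PySem.Int.mod (v + i) n)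

def pvBelow (k v t : Int) : List Int :=
  PySem.List.pyRange (max 0 (v - k)) (min v t) 1

def pvAbove (n k v t : Int) : List Int :=
  PySem.List.pyRange (max (v + 1) (n + v - k)) (min t n) 1

def pvAtt (n k v t : Int) : List Int :=
  pvBelow k v t ++ (if v < t then pvFwd n v k else []) ++ pvAbove n k v t

def pvFh (n t v : Int) : Int := if t < v then v - t else v - t + n

def pvAttI (n k t j v : Int) : List Int :=
  if v = t then pvBelow k t t ++ pvFwd n t j
  else pvAtt n k v t ++ (if pvFh n t v ≤ j then [t] else [])

def pvMapD (n : Int) (F : Int → PySem.Set Int) : PySem.Dict Int (PySem.Set Int) :=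
  PySem.Dict.mk ((PySem.List.pyRange 0 n 1).map (fun v => (v, F v)))

def pvSt (n k t : Int) : PySem.Dict Int (PySem.Set Int) :=
  pvMapD n (fun v => PySem.Set.ofList (pvAtt n k v t))

def pvStI (n k t j : Int) : PySem.Dict Int (PySem.Set Int) :=
  pvMapD n (fun v => PySem.Set.ofList (pvAttI n k t j v))

lemma pvMapD_congr (n : Int) (F G : Int → PySem.Set Int)
    (h : ∀ v, 0 ≤ v → v < n → F v = G v) : pvMapD n F = pvMapD n G := by
  unfold pvMapD
  congr 1
  apply List.map_congr_left
  intro v hv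
  rw [PySem.List.mem_pyRange_one] at hv
  rw [h v hv.1 hv.2]

lemma pvMapD_modify (n w : Int) (hw0 : 0 ≤ w) (hwn : w < n) (d0 : PySem.Set Int)
    (f : PySem.Set Int → PySem.Set Int) (F : Int → PySem.Set Int) :
    (pvMapD n F).modify w d0 f = pvMapD n (fun v => if v = w then f (F v) else F v) := by
  have hwmem : w ∈ PySem.List.pyRange 0 n 1 := by
    rw [PySem.List.mem_pyRange_one]; omega
  have hkeys : (pvMapD n F).keys = PySem.List.pyRange 0 n 1 := by
    show ((PySem.List.pyRange 0 n 1).map (fun v => (v, F v))).map (fun p => p.1)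
        = PySem.List.pyRange 0 n 1
    rw [List.map_map, show ((fun p : Int × PySem.Set Int => p.1) ∘ fun v => (v, F v))
        = id from rfl, List.map_id]
  have hnd : (pvMapD n F).keys.Nodup := by
    rw [hkeys]; exact PySem.List.nodup_pyRange_one _ _
  have hmemit : (w, F w) ∈ (pvMapD n F).items := List.mem_map_of_mem hwmem
  have hcont : (pvMapD n F).contains w = true := by
    rw [PySem.Dict.contains_iff_mem_keys, hkeys]; exact hwmem
  have hget : (pvMapD n F).getD w d0 = F w := PySem.Dict.getD_of_mem_items _ hmemit hnd d0
  have hmod : (pvMapD n F).modify w d0 f = (pvMapD n F).insert w (f ((pvMapD n F).getD w d0)) := rfl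
  rw [hmod, hget]
  apply PySem.Dict.ext
  rw [PySem.Dict.items_insert_of_contains _ _ hcont]
  show ((PySem.List.pyRange 0 n 1).map (fun v => (v, F v))).map _
      = (PySem.List.pyRange 0 n 1).map _
  rw [List.map_map]
  apply List.map_congr_left
  intro v _
  by_cases hvw : v = w
  · subst hvw; simp
  · simp [hvw]

lemma pvFwd_zero (n v : Int) : pvFwd n v 0 = [] := by
  unfold pvFwd
  rw [PySem.List.pyRange_one_eq_nil (by omega)]
  rfl

lemma pvFwd_succ (n v j : Int) (hj : 0 ≤ j) :
    pvFwd n v (j + 1) = pvFwd n v j ++ [PySem.Int.mod (v + (j + 1)) n] := by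
  unfold pvFwd
  rw [PySem.List.pyRange_one_succ_right (by omega), List.map_append]
  rfl

lemma pvAttI_zero (n k t v : Int) (ht0 : 0 ≤ t) (htn : t < n) (hv0 : 0 ≤ v) (hvn : v < n) :
    pvAttI n k t 0 v = pvAtt n k v t := by
  unfold pvAttI
  by_cases hvt : v = t
  · subst hvt
    rw [pvFwd_zero]
    unfold pvAtt pvAbove
    rw [if_neg (lt_irrefl v), PySem.List.pyRange_one_eq_nil (by omega)]
    simp
  · rw [if_neg hvt, if_neg (by unfold pvFh; split <;> omega)]
    simp

lemma pvAttI_final (n k t v : Int) (ht0 : 0 ≤ t) (htn : t < n) (hk : 0 ≤ k)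
    (hv0 : 0 ≤ v) (hvn : v < n) :
    pvAttI n k t k v = pvAtt n k v (t + 1) := by
  rcases lt_trichotomy v t with hvt | hvt | hvt
  · -- v < t : the upper range may gain [t]
    simp only [pvAttI, if_neg (show ¬ v = t by omega), pvFh,
      if_neg (show ¬ t < v by omega), pvAtt,
      if_pos (show v < t by omega), if_pos (show v < t + 1 by omega)]
    have hbelow : pvBelow k v (t + 1) = pvBelow k v t := by
      unfold pvBelow; rw [show min v (t + 1) = min v t by omega]
    rw [hbelow]
    by_cases hhit : v - t + n ≤ k
    · rw [if_pos hhit]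
      have habove : pvAbove n k v (t + 1) = pvAbove n k v t ++ [t] := by
        unfold pvAbove
        rw [show min (t + 1) n = t + 1 by omega, show min t n = t by omega,
          PySem.List.pyRange_one_succ_right (by omega)]
      rw [habove]
      simp
    · rw [if_neg hhit]
      have habove : pvAbove n k v (t + 1) = pvAbove n k v t := by
        unfold pvAbove
        rw [PySem.List.pyRange_one_eq_nil (by omega), PySem.List.pyRange_one_eq_nil (by omega)]
      rw [habove]
      simp
  · -- v = t : the forward block is complete, nothing else changes
    subst hvt
    simp only [pvAttI, if_pos rfl, pvAtt, if_neg (lt_irrefl v),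
      if_pos (show v < v + 1 by omega)]
    have hbelow : pvBelow k v (v + 1) = pvBelow k v v := by
      unfold pvBelow; rw [show min v (v + 1) = min v v by omega]
    have habove : pvAbove n k v (v + 1) = [] := by
      unfold pvAbove
      exact PySem.List.pyRange_one_eq_nil (by omega)
    rw [habove, hbelow]
    simp
  · -- t < v : the lower range may gain [t]
    simp only [pvAttI, if_neg (show ¬ v = t by omega), pvFh,
      if_pos (show t < v by omega), pvAtt,
      if_neg (show ¬ v < t by omega), if_neg (show ¬ v < t + 1 by omega)]
    have habove1 : pvAbove n k v t = [] := by
      unfold pvAbove; exact PySem.List.pyRange_one_eq_nil (by omega)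
    have habove2 : pvAbove n k v (t + 1) = [] := by
      unfold pvAbove; exact PySem.List.pyRange_one_eq_nil (by omega)
    rw [habove1, habove2]
    by_cases hhit : v - t ≤ k
    · rw [if_pos hhit]
      have hbelow : pvBelow k v (t + 1) = pvBelow k v t ++ [t] := by
        unfold pvBelow
        rw [show min v (t + 1) = t + 1 by omega, show min v t = t by omega,
          PySem.List.pyRange_one_succ_right (by omega)]
      rw [hbelow]
      simp
    · rw [if_neg hhit]
      have hbelow : pvBelow k v (t + 1) = pvBelow k v t := by
        unfold pvBelow
        rw [PySem.List.pyRange_one_eq_nil (by omega), PySem.List.pyRange_one_eq_nil (by omega)]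
      rw [hbelow]
      simp

-- the value `(t + (j+1)) % n` seen as a vertex: basic bracketing facts
lemma pv_mod_facts (n t j : Int) (hn : 0 < n) (ht0 : 0 ≤ t) (hj : 0 ≤ j) :
    0 ≤ PySem.Int.mod (t + (j + 1)) n ∧ PySem.Int.mod (t + (j + 1)) n < n ∧
      ∃ q : Int, 0 ≤ q ∧ PySem.Int.mod (t + (j + 1)) n = t + (j + 1) - q * n := by
  refine ⟨PySem.Int.mod_nonneg _ hn, PySem.Int.mod_lt _ hn, PySem.Int.floordiv (t + (j + 1)) n, ?_, ?_⟩
  · rw [PySem.Int.floordiv_eq_ediv_of_pos hn]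
    exact Int.ediv_nonneg (by omega) (by omega)
  · have := PySem.Int.floordiv_mul_add_mod (t + (j + 1)) n
    omega

lemma pv_fh_hit (n t j v : Int) (hn : 0 < n) (ht0 : 0 ≤ t) (htn : t < n) (hj : 0 ≤ j)
    (hv0 : 0 ≤ v) (hvn : v < n) (hvt : v ≠ t)
    (hw : PySem.Int.mod (t + (j + 1)) n = v) : pvFh n t v ≤ j + 1 := by
  obtain ⟨_, _, q, hq0, hq⟩ := pv_mod_facts n t j hn ht0 hj
  rw [hw] at hq
  have hqn : 0 ≤ q * n := mul_nonneg hq0 (by omega)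
  have hqn2 : q * n ≤ 0 ∨ n ≤ q * n := by
    by_cases h : q ≤ 0
    · exact Or.inl (mul_nonpos_of_nonpos_of_nonneg h (by omega))
    · exact Or.inr (le_mul_of_one_le_left (by omega) (by omega))
  unfold pvFh
  split <;> omega

lemma pv_fh_eq_imp (n t j v : Int) (hn : 0 < n) (ht0 : 0 ≤ t) (htn : t < n) (hj : 0 ≤ j)
    (hv0 : 0 ≤ v) (hvn : v < n) (hvt : v ≠ t)
    (hfh : pvFh n t v = j + 1) : PySem.Int.mod (t + (j + 1)) n = v := by
  unfold pvFh at hfh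
  rw [PySem.Int.mod_eq_emod_of_pos hn]
  by_cases hlt : t < v
  · rw [if_pos hlt] at hfh
    rw [show t + (j + 1) = v by omega]
    exact Int.emod_eq_of_lt hv0 hvn
  · rw [if_neg hlt] at hfh
    rw [show t + (j + 1) = v + n * 1 by omega, Int.add_mul_emod_self_left]
    exact Int.emod_eq_of_lt hv0 hvn

-- one step of the inner loop preserves the refined invariant
lemma pv_inner_step (n k t j w : Int) (hn : 0 < n) (ht0 : 0 ≤ t) (htn : t < n)
    (hj : 0 ≤ j) (hjk : j < k) (hw : w = PySem.Int.mod (t + (j + 1)) n) :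
    ((pvStI n k t j).modify t PySem.Set.empty (fun s => PySem.Set.add s w)).modify
      w PySem.Set.empty (fun s => PySem.Set.add s t) = pvStI n k t (j + 1) := by
  have hw0 : 0 ≤ w := hw ▸ PySem.Int.mod_nonneg _ hn
  have hwn : w < n := hw ▸ PySem.Int.mod_lt _ hn
  unfold pvStI
  rw [pvMapD_modify n t ht0 htn, pvMapD_modify n w hw0 hwn]
  apply pvMapD_congr
  intro v hv0 hvn
  by_cases hvt : v = t
  · subst hvt
    have e1 : ∀ jj : Int, pvAttI n k v jj v = pvBelow k v v ++ pvFwd n v jj :=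
      fun jj => by unfold pvAttI; exact if_pos rfl
    by_cases hvw : v = w
    · rw [if_pos hvw, if_pos rfl, e1 j, e1 (j + 1)]
      rw [pvFwd_succ n v j hj, ← hw, ← List.append_assoc,
        PySem.Set.ofList_append_singleton, hvw]
      exact PySem.Set.add_of_mem (by rw [PySem.Set.mem_add]; exact Or.inr rfl)
    · rw [if_neg hvw, if_pos rfl, e1 j, e1 (j + 1)]
      rw [pvFwd_succ n v j hj, ← hw, ← List.append_assoc,
        PySem.Set.ofList_append_singleton]
  · have e2 : ∀ jj : Int, pvAttI n k t jj v
        = pvAtt n k v t ++ (if pvFh n t v ≤ jj then [t] else []) :=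
      fun jj => by unfold pvAttI; exact if_neg hvt
    by_cases hvw : v = w
    · -- key v = w ≠ t gains the element t
      rw [if_pos hvw, if_neg hvt, e2 j, e2 (j + 1)]
      have hhit1 : pvFh n t v ≤ j + 1 :=
        pv_fh_hit n t j v hn ht0 htn hj hv0 hvn hvt (hvw.trans hw).symm
      rw [if_pos hhit1]
      by_cases hhit0 : pvFh n t v ≤ j
      · rw [if_pos hhit0]
        exact PySem.Set.add_of_mem (by rw [PySem.Set.mem_ofList]; simp)
      · rw [if_neg hhit0, List.append_nil, ← PySem.Set.ofList_append_singleton]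
    · rw [if_neg hvw, if_neg hvt, e2 j, e2 (j + 1)]
      have hiff : (pvFh n t v ≤ j + 1) ↔ (pvFh n t v ≤ j) := by
        constructor
        · intro h
          by_cases he : pvFh n t v = j + 1
          · exact absurd (pv_fh_eq_imp n t j v hn ht0 htn hj hv0 hvn hvt he)
              (fun hc => hvw (hc.symm.trans hw.symm))
          · omega
        · omega
      have : (if pvFh n t v ≤ j then [t] else [])
          = (if pvFh n t v ≤ j + 1 then [t] else []) := by
        by_cases h0 : pvFh n t v ≤ j
        · rw [if_pos h0, if_pos (hiff.mpr h0)]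
        · rw [if_neg h0, if_neg (fun hc => h0 (hiff.mp hc))]
      rw [this]

-- the tail of the inner loop, from position j, finishes the invariant
lemma pv_inner_loop (n k t : Int) (hn : 0 < n) (ht0 : 0 ≤ t) (htn : t < n) :
    ∀ (c : Nat) (j : Int), 0 ≤ j → j ≤ k → (k - j).toNat = c →
    (PySem.List.pyRange (j + 1) (k + 1) 1).foldl
      (fun d i =>
        let vizinho := PySem.Int.mod (t + i) n
        let d := d.modify t PySem.Set.empty (fun s => PySem.Set.add s vizinho)
        d.modify vizinho PySem.Set.empty (fun s => PySem.Set.add s t)) (pvStI n k t j)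
    = pvStI n k t k := by
  intro c
  induction c with
  | zero =>
    intro j hj0 hjk hc
    have : j = k := by omega
    subst this
    rw [PySem.List.pyRange_one_eq_nil (by omega)]
    rfl
  | succ c ih =>
    intro j hj0 hjk hc
    have hjlt : j < k := by omega
    rw [PySem.List.pyRange_one_cons (by omega), List.foldl_cons]
    have hstep : (let vizinho := PySem.Int.mod (t + (j + 1)) n
        let d := (pvStI n k t j).modify t PySem.Set.empty
          (fun s => PySem.Set.add s vizinho)
        d.modify vizinho PySem.Set.empty (fun s => PySem.Set.add s t))
        = pvStI n k t (j + 1) :=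
      pv_inner_step n k t j _ hn ht0 htn hj0 hjlt rfl
    rw [hstep]
    exact ih (j + 1) (by omega) (by omega) (by omega)

-- with k < 0 (empty inner loop) nothing changes from t to t+1
lemma pv_att_stable_neg (n k v t : Int) (hk : k < 0) (ht0 : 0 ≤ t) (htn : t < n)
    (hv0 : 0 ≤ v) (hvn : v < n) : pvAtt n k v (t + 1) = pvAtt n k v t := by
  have hfwd : pvFwd n v k = [] := by
    unfold pvFwd
    rw [PySem.List.pyRange_one_eq_nil (show k + 1 ≤ 1 by omega)]
    rfl
  have habove : ∀ s : Int, s ≤ n → pvAbove n k v s = [] := by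
    intro s hs
    unfold pvAbove
    exact PySem.List.pyRange_one_eq_nil (by omega)
  have hbelow : pvBelow k v (t + 1) = pvBelow k v t := by
    unfold pvBelow
    by_cases h : v ≤ t
    · rw [show min v (t + 1) = min v t by omega]
    · rw [PySem.List.pyRange_one_eq_nil (by omega), PySem.List.pyRange_one_eq_nil (by omega)]
  unfold pvAtt
  rw [habove (t + 1) (by omega), habove t (by omega), hbelow]
  rcases lt_trichotomy v t with h | h | h
  · rw [if_pos h, if_pos (by omega)]
  · subst h
    rw [if_neg (lt_irrefl v), if_pos (by omega), hfwd]
  · rw [if_neg (by omega), if_neg (by omega)]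

-- one step of the outer loop
lemma pv_outer_step (n k t : Int) (hn : 0 < n) (ht0 : 0 ≤ t) (htn : t < n) :
    (PySem.List.pyRange 1 (k + 1) 1).foldl
      (fun d i =>
        let vizinho := PySem.Int.mod (t + i) n
        let d := d.modify t PySem.Set.empty (fun s => PySem.Set.add s vizinho)
        d.modify vizinho PySem.Set.empty (fun s => PySem.Set.add s t)) (pvSt n k t)
    = pvSt n k (t + 1) := by
  by_cases hk : 0 ≤ k
  · have hzero : pvSt n k t = pvStI n k t 0 := by
      unfold pvSt pvStI
      apply pvMapD_congr
      intro v hv0 hvn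
      rw [pvAttI_zero n k t v ht0 htn hv0 hvn]
    have hfin : pvStI n k t k = pvSt n k (t + 1) := by
      unfold pvSt pvStI
      apply pvMapD_congr
      intro v hv0 hvn
      rw [pvAttI_final n k t v ht0 htn hk hv0 hvn]
    have hloop := pv_inner_loop n k t hn ht0 htn (k - 0).toNat 0 (by omega) hk rfl
    rw [show (0 : Int) + 1 = 1 by omega] at hloop
    rw [hzero, hloop, hfin]
  · rw [PySem.List.pyRange_one_eq_nil (by omega)]
    show pvSt n k t = pvSt n k (t + 1)
    unfold pvSt
    apply pvMapD_congr
    intro v hv0 hvn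
    rw [pv_att_stable_neg n k v t (by omega) ht0 htn hv0 hvn]

-- the whole outer loop
lemma pv_outer_loop (n k : Int) (hn : 0 < n) :
    ∀ (c : Nat) (t : Int), 0 ≤ t → t ≤ n → (n - t).toNat = c →
    (PySem.List.pyRange t n 1).foldl
      (fun d vertice =>
        (PySem.List.pyRange 1 (k + 1) 1).foldl
          (fun d i =>
            let vizinho := PySem.Int.mod (vertice + i) n
            let d := d.modify vertice PySem.Set.empty (fun s => PySem.Set.add s vizinho)
            d.modify vizinho PySem.Set.empty (fun s => PySem.Set.add s vertice)) d)
      (pvSt n k t)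
    = pvSt n k n := by
  intro c
  induction c with
  | zero =>
    intro t ht0 htn hc
    have : t = n := by omega
    subst this
    rw [show PySem.List.pyRange t t 1 = ([] : List Int) from
      PySem.List.pyRange_one_eq_nil le_rfl]
    rfl
  | succ c ih =>
    intro t ht0 htn hc
    have htlt : t < n := by omega
    rw [show PySem.List.pyRange t n 1 = t :: PySem.List.pyRange (t + 1) n 1 from
      PySem.List.pyRange_one_cons (by omega), List.foldl_cons]
    rw [pv_outer_step n k t hn ht0 htlt]
    exact ih (t + 1) (by omega) (by omega) (by omega)

-- A's initial comprehension is the t = 0 state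
lemma pv_g0 (n k : Int) :
    (PySem.List.pyRange 0 n 1).foldl
      (fun d v => d.insert v PySem.Set.empty) PySem.Dict.empty = pvSt n k 0 := by
  apply PySem.Dict.ext
  rw [PySem.Dict.items_foldl_insert_fresh (PySem.List.pyRange 0 n 1) (fun v => v)
    (fun _ => PySem.Set.empty) PySem.Dict.empty
    (fun _ _ => rfl) (by simpa using PySem.List.nodup_pyRange_one 0 n)]
  show [] ++ _ = (PySem.List.pyRange 0 n 1).map _
  rw [List.nil_append]
  apply List.map_congr_left
  intro v hv
  rw [PySem.List.mem_pyRange_one] at hv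
  have hatt : pvAtt n k v 0 = [] := by
    unfold pvAtt pvBelow pvAbove
    rw [if_neg (by omega), PySem.List.pyRange_one_eq_nil (by omega),
      PySem.List.pyRange_one_eq_nil (by omega)]
    rfl
  show (v, PySem.Set.empty) = (v, PySem.Set.ofList (pvAtt n k v 0))
  rw [hatt]
  rfl

-- B's per-vertex set is the final attempt list
lemma pv_B_items (n k : Int) :
    gerar_grafo_kn_alt n k
    = (PySem.List.pyRange 0 n 1).map (fun v => (v, PySem.Set.ofList (pvAtt n k v n))) := by
  unfold gerar_grafo_kn_alt
  rw [PySem.Dict.items_foldl_insert_fresh (PySem.List.pyRange 0 n 1) (fun v => v)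
    (fun v => PySem.Set.update (PySem.Set.update
        (PySem.Set.ofList (PySem.List.pyRange (max 0 (v - k)) v 1))
        ((PySem.List.pyRange 1 (k + 1) 1).map (fun i => PySem.Int.mod (v + i) n)))
      (PySem.List.pyRange (max (v + 1) (n + v - k)) n 1))
    PySem.Dict.empty (fun _ _ => rfl)
    (by simpa using PySem.List.nodup_pyRange_one 0 n)]
  show [] ++ _ = _
  rw [List.nil_append]
  apply List.map_congr_left
  intro v hv
  rw [PySem.List.mem_pyRange_one] at hv
  have hatt : pvAtt n k v n
      = PySem.List.pyRange (max 0 (v - k)) v 1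
        ++ (((PySem.List.pyRange 1 (k + 1) 1).map (fun i => PySem.Int.mod (v + i) n))
          ++ PySem.List.pyRange (max (v + 1) (n + v - k)) n 1) := by
    unfold pvAtt pvBelow pvAbove pvFwd
    rw [if_pos hv.2, show min v n = v by omega, show min n n = n by omega, List.append_assoc]
  rw [hatt, PySem.Set.ofList_append, PySem.Set.update_append]

-- ===== VERDICT (by name: the statement is the Claim_ definition above) =====
theorem gerar_grafo_kn_spec : Claim_equal_gerar_grafo_kn := by
  intro n k _
  unfold Spec_gerar_grafo_kn
  rw [pv_B_items]
  unfold gerar_grafo_kn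
  rw [pv_g0 n k]
  show ((PySem.List.pyRange 0 n 1).foldl
      (fun d vertice =>
        (PySem.List.pyRange 1 (k + 1) 1).foldl
          (fun d i =>
            let vizinho := PySem.Int.mod (vertice + i) n
            let d := d.modify vertice PySem.Set.empty (fun s => PySem.Set.add s vizinho)
            d.modify vizinho PySem.Set.empty (fun s => PySem.Set.add s vertice)) d)
      (pvSt n k 0)).items
    = (PySem.List.pyRange 0 n 1).map (fun v => (v, PySem.Set.ofList (pvAtt n k v n)))
  by_cases hn : n ≤ 0
  · unfold pvSt pvMapD
    rw [show PySem.List.pyRange 0 n 1 = ([] : List Int) from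
      PySem.List.pyRange_one_eq_nil hn]
    rfl
  · rw [pv_outer_loop n k (by omega) (n - 0).toNat 0 (by omega) (by omega) rfl]
    rfl
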